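-- pv_equiv track=rewrite | github.com/savkov/crfppftvec | crfppftvec.py | parse_ng_range
-- ===== SOURCE A (Python) =====
-- def nrange(start, stop, step):
--     """Returns the indices of n-grams in a context window. Works much like
--     range(start, stop, step), but the stop index is inclusive, and indices are
--     included only if the step can fit between the candidate index and the stop
--     index.
--
--     :param start: starting index
--     :type start: int
--     :param stop: stop index
--     :type stop: int
--     :param step: n-gram length
--     :type step: int
--     :return: n-gram indices from left to right
--     :rtype: list of int
--     """
--     idx = start
--     rng = []
--     while idx + step <= stop + 1:
--         rng.append(idx)
--         idx += 1
--     return rng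
--
-- def parse_ng_range(fw, n):
--     """Transforms context window index list to a context window n-gram index
--     list.
--
--     :param fw: context window
--     :type fw: list of int
--     :param n: n in n-grams
--     :type n: int
--     :return: n-gram indices
--     :rtype: list of int
--     """
--     subranges = []
--     cur = None
--     rng = []
--     for i in fw:
--         if cur == None or cur + 1 == i:
--             rng.append(i)
--             cur = i
--         else:
--             subranges.append(rng)
--             rng = [i]
--             cur = i
--     subranges.append(rng)
--     nrng = []
--     for sr in subranges:
--         for i in nrange(sr[0], sr[-1], n):
--             nrng.append(i)
--     return nrng
-- ===== SOURCE B (Python) =====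
-- def parse_ng_range(fw, n):
--     out = []
--     start = prev = fw[0]
--     for x in fw[1:]:
--         if x == prev + 1:
--             prev = x
--         else:
--             out.extend(range(start, prev - n + 2))
--             start = prev = x
--     out.extend(range(start, prev - n + 2))
--     return out
-- ===== Notes on version B (the rewrite author's own statement) =====
-- stated objective: simpler
-- what changed: One pass tracking only two scalars (run start and previous element) and emitting each block inline as range(start, prev-n+2), instead of A's two-phase algorithm that first materialises a list of run sublists and then walks it calling a hand-written while-loop (nrange) per run.
import Mathlib
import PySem

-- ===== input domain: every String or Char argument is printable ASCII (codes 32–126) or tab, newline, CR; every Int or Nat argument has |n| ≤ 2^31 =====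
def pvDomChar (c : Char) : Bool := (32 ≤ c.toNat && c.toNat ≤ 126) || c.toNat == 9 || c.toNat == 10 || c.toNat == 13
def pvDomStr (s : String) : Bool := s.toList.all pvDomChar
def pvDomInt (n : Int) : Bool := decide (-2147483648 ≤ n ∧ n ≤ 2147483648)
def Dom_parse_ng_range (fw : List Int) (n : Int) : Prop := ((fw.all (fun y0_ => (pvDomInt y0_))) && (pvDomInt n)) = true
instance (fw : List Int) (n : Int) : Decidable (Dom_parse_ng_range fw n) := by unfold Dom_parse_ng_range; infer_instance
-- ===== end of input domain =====

-- B replaces A's two-phase run-sublist construction + per-run while-loop (nrange) by a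
-- single pass over fw tracking two scalars, emitting each block as range(start, prev-n+2);
-- objective: simpler (same asymptotic cost).

-- ===== PORT A =====
-- while idx + step <= stop + 1: rng.append(idx); idx += 1
def nrangeLoop (idx stop step : Int) (rng : List Int) : List Int :=
  if _h : idx + step ≤ stop + 1 then nrangeLoop (idx + 1) stop step (rng ++ [idx]) else rng
termination_by (stop + 2 - idx - step).toNat
decreasing_by omega

def nrange (start stop step : Int) : List Int := nrangeLoop start stop step []

-- the body of A's first for-loop, state = (subranges, cur, rng)
def aStep (st : List (List Int) × Option Int × List Int) (i : Int) :
    List (List Int) × Option Int × List Int :=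
  if st.2.1 = none ∨ st.2.1 = some (i - 1) then (st.1, some i, st.2.2 ++ [i])
  else (st.1 ++ [st.2.2], some i, [i])

-- the body of A's second for-loop: nrng.extend by nrange(sr[0], sr[-1], n)
-- (sr[0]/sr[-1] via pyGet?; the .getD 0 is unreachable inside Pre_, where every run is nonempty)
def aEmit (n : Int) (nrng : List Int) (sr : List Int) : List Int :=
  nrng ++ nrange ((PySem.List.pyGet? sr 0).getD 0) ((PySem.List.pyGet? sr (-1)).getD 0) n

def parse_ng_range (fw : List Int) (n : Int) : List Int :=
  let s := fw.foldl aStep (([] : List (List Int)), (none : Option Int), ([] : List Int))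
  let subranges := s.1 ++ [s.2.2]
  subranges.foldl (aEmit n) []

-- ===== PORT B =====
-- for x in fw[1:]: …  with state (out, start, prev)
def altLoop (n : Int) (out : List Int) (start prev : Int) (rest : List Int) : List Int :=
  match rest with
  | [] => out ++ PySem.List.pyRange start (prev - n + 2) 1
  | x :: xs =>
      if x = prev + 1 then altLoop n out start x xs
      else altLoop n (out ++ PySem.List.pyRange start (prev - n + 2) 1) x x xs

def parse_ng_range_alt (fw : List Int) (n : Int) : List Int :=
  match fw with
  | [] => []          -- fw[0] raises IndexError in Python; outside Pre_
  | x :: rest => altLoop n [] x x rest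

-- ===== PRECONDITION & SPEC =====
-- Pre_ excludes only fw = [], on which both Pythons raise IndexError (fw[0] / sr[0]).
def Pre_parse_ng_range (fw : List Int) (n : Int) : Prop := fw ≠ []
instance (fw : List Int) (n : Int) : Decidable (Pre_parse_ng_range fw n) := by
  unfold Pre_parse_ng_range; infer_instance

def pvWitness_parse_ng_range : List Int × Int := ([1, 2, 5, 6, 7], 2)

def Spec_parse_ng_range (fw : List Int) (n : Int) (out : List Int) : Prop := out = parse_ng_range_alt fw n
instance (fw : List Int) (n : Int) (out : List Int) : Decidable (Spec_parse_ng_range fw n out) := by unfold Spec_parse_ng_range; infer_instance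

-- ===== CLAIM (what is proved, stated in full; the proofs are below) =====
def Claim_equal_parse_ng_range : Prop := ∀ (fw : List Int) (n : Int), Dom_parse_ng_range fw n → Pre_parse_ng_range fw n → Spec_parse_ng_range fw n (parse_ng_range fw n)

-- ===== LEMMAS AND PROOFS =====

-- A's while-loop is range(start, stop - step + 2) prefixed by the accumulator
theorem nrangeLoop_eq_aux (stop step : Int) (k : Nat) : ∀ (idx : Int) (acc : List Int),
    (stop + 2 - idx - step).toNat = k →
    nrangeLoop idx stop step acc = acc ++ PySem.List.pyRange idx (stop - step + 2) 1 := by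
  induction k with
  | zero =>
      intro idx acc hk
      rw [nrangeLoop.eq_def, dif_neg (by omega), PySem.List.pyRange_one_eq_nil (by omega)]
      simp
  | succ k ih =>
      intro idx acc hk
      rw [nrangeLoop.eq_def, dif_pos (by omega), ih (idx + 1) _ (by omega),
        PySem.List.pyRange_one_cons (by omega : idx < stop - step + 2)]
      simp

theorem nrangeLoop_eq (idx stop step : Int) (acc : List Int) :
    nrangeLoop idx stop step acc = acc ++ PySem.List.pyRange idx (stop - step + 2) 1 :=
  nrangeLoop_eq_aux stop step _ idx acc rfl

theorem nrange_eq (start stop step : Int) :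
    nrange start stop step = PySem.List.pyRange start (stop - step + 2) 1 := by
  simp [nrange, nrangeLoop_eq]

-- B's loop accumulates on the left
theorem altLoop_acc (n : Int) (rest : List Int) : ∀ (out : List Int) (start prev : Int),
    altLoop n out start prev rest = out ++ altLoop n [] start prev rest := by
  induction rest with
  | nil => intro out start prev; simp [altLoop]
  | cons x xs ih =>
      intro out start prev
      by_cases h : x = prev + 1
      · simp only [altLoop, if_pos h]; rw [ih]
      · simp only [altLoop, if_neg h]
        rw [ih (out ++ PySem.List.pyRange start (prev - n + 2) 1) x x,
            ih ([] ++ PySem.List.pyRange start (prev - n + 2) 1) x x]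
        simp

theorem pyGet?_single_zero (x : Int) : PySem.List.pyGet? [x] 0 = some x := by
  simp

theorem pyGet?_single_neg_one (x : Int) : PySem.List.pyGet? [x] (-1) = some x := by
  simp [PySem.List.pyGet?_neg_one]

theorem pyGet?_zero_ne_nil {rng : List Int} {s : Int} (h : PySem.List.pyGet? rng 0 = some s) :
    rng ≠ [] := by
  intro hn; subst hn; simp [PySem.List.pyGet?] at h

-- invariant of A's first loop: folding the rest of fw from a state whose current run has
-- head `start` and last element `prev` yields the flushed runs followed by B's loop output
theorem aFold_eq (n : Int) (xs : List Int) : ∀ (subs : List (List Int)) (start prev : Int) (rng : List Int),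
    PySem.List.pyGet? rng 0 = some start → PySem.List.pyGet? rng (-1) = some prev →
    (let s := xs.foldl aStep (subs, some prev, rng)
     (s.1 ++ [s.2.2]).foldl (aEmit n) []) =
      subs.foldl (aEmit n) [] ++ altLoop n [] start prev xs := by
  induction xs with
  | nil =>
      intro subs start prev rng h0 h1
      simp only [List.foldl_nil, List.foldl_append, List.foldl_cons, altLoop]
      simp [aEmit, h0, h1, nrange_eq]
  | cons x xs ih =>
      intro subs start prev rng h0 h1
      simp only [List.foldl_cons]
      by_cases h : x = prev + 1
      · have hst : aStep (subs, some prev, rng) x = (subs, some x, rng ++ [x]) := by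
          simp [aStep, h]
        rw [hst, ih subs start x (rng ++ [x])
            (by have := pyGet?_zero_ne_nil h0
                rcases rng with _ | ⟨a, l⟩
                · simp at this
                · simpa [PySem.List.pyGet?_zero] using (by simpa [PySem.List.pyGet?_zero] using h0))
            (PySem.List.pyGet?_neg_one_append_singleton rng x)]
        simp [altLoop, h]
      · have hne : prev ≠ x - 1 := by omega
        have hst : aStep (subs, some prev, rng) x = (subs ++ [rng], some x, [x]) := by
          simp [aStep, hne]
        rw [hst, ih (subs ++ [rng]) x x [x] (pyGet?_single_zero x) (pyGet?_single_neg_one x)]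
        simp only [altLoop, if_neg h]
        rw [altLoop_acc n xs ([] ++ PySem.List.pyRange start (prev - n + 2) 1) x x]
        simp [aEmit, h0, h1, nrange_eq]

-- ===== VERDICT (by name: the statement is the Claim_ definition above) =====
theorem parse_ng_range_spec : Claim_equal_parse_ng_range := by
  intro fw n _ hpre
  unfold Spec_parse_ng_range
  rcases fw with _ | ⟨x, rest⟩
  · exact absurd rfl hpre
  · show parse_ng_range (x :: rest) n = parse_ng_range_alt (x :: rest) n
    unfold parse_ng_range parse_ng_range_alt
    simp only [List.foldl_cons]
    have hst : aStep (([] : List (List Int)), (none : Option Int), ([] : List Int)) x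
        = ([], some x, [x]) := by simp [aStep]
    rw [hst]
    have := aFold_eq n rest [] x x [x] (pyGet?_single_zero x) (pyGet?_single_neg_one x)
    simpa using this
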